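-- pv_equiv track=rewrite | github.com/glassus/aoc2021 | day03/03_2.py | filtre_min
-- ===== SOURCE A (Python) =====
-- def filtre_min(data, i):
--     c = 0
--
--     for mot in data:
--         if mot[i] == '1':
--             c += 1
--     if c >= len(data) - c:
--         val_min = "0"
--     else:
--         val_min = "1"
--     new_data = [mot for mot in data if mot[i] == val_min]
--     return new_data
-- ===== SOURCE B (Python) =====
-- def filtre_min(data, i):
--     ones, zeros = [], []
--     for mot in data:
--         if mot[i] == '1':
--             ones.append(mot)
--         elif mot[i] == '0':
--             zeros.append(mot)
--     if len(ones) >= len(data) - len(ones):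
--         return zeros
--     return ones
-- ===== Notes on version B (the rewrite author's own statement) =====
-- stated objective: simpler
-- what changed: B partitions the words into the '1'-group and the '0'-group in a single pass and returns the minority group (tie to zeros, comparing against len(data)-len(ones) as A does), instead of A's two passes: count then re-scan to filter.
import Mathlib
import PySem

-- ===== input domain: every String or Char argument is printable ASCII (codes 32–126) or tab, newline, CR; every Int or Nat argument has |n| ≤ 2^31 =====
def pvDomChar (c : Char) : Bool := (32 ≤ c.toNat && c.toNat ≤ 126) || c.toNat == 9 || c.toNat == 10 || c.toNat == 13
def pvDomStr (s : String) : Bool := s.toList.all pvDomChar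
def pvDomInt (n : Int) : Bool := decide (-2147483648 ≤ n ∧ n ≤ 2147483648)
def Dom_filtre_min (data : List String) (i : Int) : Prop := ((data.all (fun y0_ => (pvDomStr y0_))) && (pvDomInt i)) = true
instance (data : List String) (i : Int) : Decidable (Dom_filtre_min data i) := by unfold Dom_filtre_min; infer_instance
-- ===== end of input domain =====

-- B partitions the words into the '1'-group and the '0'-group in one pass and returns
-- the minority group (tie to zeros, comparing against len(data)-len(ones) like A),
-- instead of A's count pass followed by a second filtering pass. Objective: simpler.

-- ===== PORT A =====
def filtre_min (data : List String) (i : Int) : List String :=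
  let c : Int := data.foldl (fun c mot =>
    if PySem.Str.pyGet? mot i == some '1' then c + 1 else c) 0
  let val_min : Char := if c ≥ (data.length : Int) - c then '0' else '1'
  data.filter (fun mot => PySem.Str.pyGet? mot i == some val_min)

-- ===== PORT B =====
def filtre_min_alt (data : List String) (i : Int) : List String :=
  let p : List String × List String := data.foldl (fun p mot =>
    if PySem.Str.pyGet? mot i == some '1' then (p.1 ++ [mot], p.2)
    else if PySem.Str.pyGet? mot i == some '0' then (p.1, p.2 ++ [mot])
    else p) ([], [])
  if (p.1.length : Int) ≥ (data.length : Int) - p.1.length then p.2 else p.1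

-- ===== PRECONDITION & SPEC =====
-- Pre_ excludes exactly the inputs where Python A raises IndexError (some word has no column i).
def Pre_filtre_min (data : List String) (i : Int) : Prop :=
  ∀ mot ∈ data, PySem.Raise.InRange mot.toList.length i
instance (data : List String) (i : Int) : Decidable (Pre_filtre_min data i) := by
  unfold Pre_filtre_min; infer_instance
def pvWitness_filtre_min : List String × Int := (["10", "01", "11"], 0)

def Spec_filtre_min (data : List String) (i : Int) (out : List String) : Prop := out = filtre_min_alt data i
instance (data : List String) (i : Int) (out : List String) : Decidable (Spec_filtre_min data i out) := by unfold Spec_filtre_min; infer_instance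

-- ===== CLAIM (what is proved, stated in full; the proofs are below) =====
def Claim_equal_filtre_min : Prop := ∀ (data : List String) (i : Int), Dom_filtre_min data i → Pre_filtre_min data i → Spec_filtre_min data i (filtre_min data i)

-- ===== LEMMAS AND PROOFS =====

-- A's counting loop counts exactly the filtered '1'-words.
theorem pv_count_eq_filter_length (p : String → Bool) (data : List String) (a : Int) :
    data.foldl (fun c mot => if p mot then c + 1 else c) a
      = a + ((data.filter p).length : Int) := by
  induction data generalizing a with
  | nil => simp
  | cons x xs ih =>
    simp only [List.foldl, List.filter]
    by_cases h : p x <;> simp [h, ih]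
    omega

-- B's partition loop accumulates the two filters.
theorem pv_partition_eq (p q : String → Bool)
    (hdisj : ∀ mot, p mot = true → q mot = false) (data : List String)
    (acc : List String × List String) :
    data.foldl (fun r mot =>
      if p mot then (r.1 ++ [mot], r.2)
      else if q mot then (r.1, r.2 ++ [mot])
      else r) acc
      = (acc.1 ++ data.filter p, acc.2 ++ data.filter q) := by
  induction data generalizing acc with
  | nil => simp
  | cons x xs ih =>
    simp only [List.foldl, List.filter]
    by_cases hp : p x
    · simp [hp, ih, hdisj x hp]
    · by_cases hq : q x <;> simp [hp, hq, ih]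

-- ===== VERDICT (by name: the statement is the Claim_ definition above) =====
theorem filtre_min_spec : Claim_equal_filtre_min := by
  intro data i _ _
  show filtre_min data i = filtre_min_alt data i
  unfold filtre_min filtre_min_alt
  rw [pv_count_eq_filter_length, pv_partition_eq _ _ (fun mot hp => by
    cases h : PySem.Str.pyGet? mot i <;> simp_all
    subst h; decide)]
  simp only [List.nil_append, Int.zero_add]
  split_ifs with h <;> simp_all
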